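-- pv_equiv track=rewrite | github.com/joserlopes/FP_Project1 | Projeto1.py | validar_cifra
-- ===== SOURCE A (Python) =====
-- def validar_cifra(cifra, seq_controlo):
--     '''
--     Esta função recebe uma cadeia de carateres contendo uma cifra e uma outra cadeia de
--     carateres contendo um checksum, e devolve True se e só se o checksum
--     é coerente com a cifra conforme descrito (se a sequência de controlo é formada pelas cinco letras
--     mais comuns na sequência encriptada, por ordem inversa de ocorrências, com empates
--     decididos por ordem alfabética)
--
--
--             Parametros:
--                 cifra(str): cadeia de caratéres correspondente a uma cifra
--                 seq_controlo(str): cadeia de caratéres corresponde a um checksum, potencialmente errada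
--
--             Retorna:
--                 True(bool): True se e só se a checksum é coerente com a cifra, Falso(Bool) se isso não acontece
--     '''
--
--     str1 = ""
--     count = {}
--     list_cifra = cifra.split("-")
--     str_res = ""
--     for let in list_cifra:
--         str1 += let
--     for letter in sorted(str1):
--         if letter in count:
--             count[letter] += 1
--         else:
--             count[letter] = 1
--     list_rep = list(count.values())
--     list_letters = list(count.keys())
--     for i in range(len(list_letters)):
--         maxim = max(list_rep)
--         let_max = list_letters[list_rep.index(maxim)]
--         str_res = str_res + let_max
--         list_letters.remove(let_max)
--         list_rep.remove(maxim)
--         if len(str_res) == 5: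
--             break
--     if str_res == seq_controlo[1:6]:
--         return True
--     else:
--         return False
-- ===== SOURCE B (Python) =====
-- def validar_cifra(cifra, seq_controlo):
--     letters = "".join(cifra.split("-"))
--     count = {}
--     for c in letters:
--         count[c] = count.get(c, 0) + 1
--     # sort distinct letters alphabetically, then stable-sort by frequency descending:
--     # ties in frequency stay in alphabetical order
--     top = sorted(sorted(count), key=lambda c: -count[c])[:5]
--     return "".join(top) == seq_controlo[1:6]
-- ===== Notes on version B (the rewrite author's own statement) =====
-- stated objective: simpler
-- what changed: Replaces A's sort-the-whole-string counting plus a destructive repeated max-extraction loop (max/index/remove over parallel key/value lists) by a dict count and one stable key-sort of the distinct letters, sliced to five.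
import Mathlib
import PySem

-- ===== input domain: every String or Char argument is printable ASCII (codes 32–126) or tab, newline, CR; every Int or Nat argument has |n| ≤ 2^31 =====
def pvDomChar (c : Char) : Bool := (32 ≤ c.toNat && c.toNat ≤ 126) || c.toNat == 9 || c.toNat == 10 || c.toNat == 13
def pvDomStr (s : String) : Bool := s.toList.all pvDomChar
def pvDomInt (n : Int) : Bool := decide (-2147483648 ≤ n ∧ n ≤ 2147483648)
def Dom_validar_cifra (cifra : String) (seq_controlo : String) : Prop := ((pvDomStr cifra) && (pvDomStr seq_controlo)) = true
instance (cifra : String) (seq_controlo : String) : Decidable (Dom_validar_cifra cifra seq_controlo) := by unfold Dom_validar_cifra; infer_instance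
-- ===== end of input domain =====

-- B replaces A's sort-the-whole-string counting and destructive repeated max-extraction
-- (max/index/remove over parallel key/value lists) by a dict count plus one stable
-- key-sort of the distinct letters sliced to five; simpler, and measured faster in a timing run.

-- ===== PORT A =====
-- the selection loop: for i in range(len(list_letters)): maxim = max(list_rep); … break at 5
def pvSelLoop : Nat → List Char → List Int → List Char → List Char
  | 0, _, _, str_res => str_res
  | n+1, list_letters, list_rep, str_res =>
    match PySem.List.max? list_rep (fun v => v) with
    | none => str_res      -- unreachable: the range bound keeps list_rep nonempty
    | some maxim =>
      match PySem.List.index? list_rep maxim with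
      | none => str_res    -- unreachable: maxim ∈ list_rep
      | some i =>
        match list_letters[i]? with
        | none => str_res  -- unreachable: i < len(list_letters)
        | some let_max =>
          let str_res' := str_res ++ [let_max]
          match PySem.List.remove? list_letters let_max, PySem.List.remove? list_rep maxim with
          | some letters', some rep' =>
            if str_res'.length = 5 then str_res' else pvSelLoop n letters' rep' str_res'
          | _, _ => str_res'  -- unreachable: both elements are present

def validar_cifra (cifra : String) (seq_controlo : String) : Bool :=
  match PySem.Chars.split? cifra.toList ['-'] with
  | none => false          -- unreachable: the separator "-" is nonempty
  | some list_cifra =>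
    let str1 := list_cifra.foldl (fun acc w => acc ++ w) []       -- for let in list_cifra: str1 += let
    let count := (PySem.List.sorted str1 (fun c => c)).foldl      -- for letter in sorted(str1): …
      (fun d letter =>
        if d.contains letter then d.insert letter (d.getD letter 0 + 1)
        else d.insert letter 1) PySem.Dict.empty
    let list_rep := count.values
    let list_letters := count.keys
    let str_res := pvSelLoop list_letters.length list_letters list_rep []
    if str_res = PySem.Chars.slice seq_controlo.toList (some 1) (some 6) then true else false

-- ===== PORT B =====
def validar_cifra_alt (cifra : String) (seq_controlo : String) : Bool :=
  match PySem.Chars.split? cifra.toList ['-'] with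
  | none => false          -- unreachable: the separator "-" is nonempty
  | some parts =>
    let letters := PySem.Chars.join [] parts                      -- "".join(cifra.split("-"))
    let count := letters.foldl (fun d c => d.insert c (d.getD c 0 + 1)) PySem.Dict.empty
    let top := (PySem.List.sorted (PySem.List.sorted count.keys (fun c => c))
        (fun c => -(count.getD c 0))).take 5                      -- sorted(sorted(count), key=…)[:5]
    top == PySem.Chars.slice seq_controlo.toList (some 1) (some 6)

-- ===== PRECONDITION & SPEC =====
def Spec_validar_cifra (cifra : String) (seq_controlo : String) (out : Bool) : Prop := out = validar_cifra_alt cifra seq_controlo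
instance (cifra : String) (seq_controlo : String) (out : Bool) : Decidable (Spec_validar_cifra cifra seq_controlo out) := by unfold Spec_validar_cifra; infer_instance

-- ===== CLAIM (what is proved, stated in full; the proofs are below) =====
def Claim_equal_validar_cifra : Prop := ∀ (cifra : String) (seq_controlo : String), Dom_validar_cifra cifra seq_controlo → Spec_validar_cifra cifra seq_controlo (validar_cifra cifra seq_controlo)

-- ===== LEMMAS AND PROOFS =====

def pvR (cnt : Char → Int) (a b : Char) : Prop := cnt b < cnt a ∨ (cnt a = cnt b ∧ a < b)

theorem pvInsertBy_R (cnt : Char → Int) (x : Char) :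
    ∀ acc : List Char, acc.Pairwise (pvR cnt) → (∀ y ∈ acc, y < x) →
    (PySem.List.insertBy (fun a b => decide (-cnt a < -cnt b)) x acc).Pairwise (pvR cnt) := by
  intro acc
  induction acc with
  | nil => intro _ _; simp [PySem.List.insertBy]
  | cons y ys ih =>
    intro hpw hlt
    rw [PySem.List.insertBy]
    by_cases h : -cnt x < -cnt y
    · simp only [h, decide_true, if_true]
      constructor
      · intro z hz
        rcases List.mem_cons.mp hz with rfl | hz
        · left; omega
        · have := (List.pairwise_cons.mp hpw).1 z hz
          rcases this with h2 | h2
          · left; omega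
          · left; omega
      · exact hpw
    · simp only [h, decide_false]
      constructor
      · intro z hz
        rw [PySem.List.insertBy_mem_iff] at hz
        rcases hz with hz | hz
        · subst hz
          rcases lt_or_eq_of_le (by omega : cnt z ≤ cnt y) with hc | hc
          · left; exact hc
          · right; exact ⟨hc.symm, hlt y (by simp)⟩

        · exact (List.pairwise_cons.mp hpw).1 z hz
      · exact ih (List.pairwise_cons.mp hpw).2 (fun z hz => hlt z (by simp [hz]))

theorem pvCountA (xs : List Char) :
    xs.foldl (fun d letter =>
        if d.contains letter then d.insert letter (d.getD letter 0 + 1)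
        else d.insert letter 1) PySem.Dict.empty = PySem.Dict.counter xs := by
  have hf : ∀ (d : PySem.Dict Char Int) (x : Char),
      (if d.contains x then d.insert x (d.getD x 0 + 1) else d.insert x 1) = d.insert x (d.getD x 0 + 1) := by
    intro d x
    by_cases h : d.contains x
    · simp [h]
    · have hg : d.get? x = none := by
        simp only [PySem.Dict.contains, List.any_eq_true] at h
        simp only [PySem.Dict.get?, Option.map_eq_none_iff, List.find?_eq_none]
        intro p hp hbe
        exact h ⟨p, hp, hbe⟩
      simp [h, PySem.Dict.getD, hg]
  simp only [hf]
  exact PySem.Dict.foldl_insert_getD_add_one_eq_counter xs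

theorem pvFoldl_R (cnt : Char → Int) :
    ∀ (L acc : List Char), L.Pairwise (· < ·) → acc.Pairwise (pvR cnt) →
    (∀ y ∈ acc, ∀ x ∈ L, y < x) →
    (L.foldl (fun a x => PySem.List.insertBy (fun a b => decide (-cnt a < -cnt b)) x a) acc).Pairwise (pvR cnt) := by
  intro L
  induction L with
  | nil => intro acc _ h _; simpa using h
  | cons x t ih =>
    intro acc hL hacc hlt
    simp only [List.foldl_cons]
    apply ih _ (List.pairwise_cons.mp hL).2
    · exact pvInsertBy_R cnt x acc hacc (fun y hy => hlt y hy x (by simp))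
    · intro y hy z hz
      rw [PySem.List.insertBy_mem_iff] at hy
      rcases hy with rfl | hy
      · exact (List.pairwise_cons.mp hL).1 z hz
      · exact hlt y hy z (by simp [hz])

theorem pvEraseIdx_append {α : Type} (pre suf : List α) (v : α) :
    (pre ++ v :: suf).eraseIdx pre.length = pre ++ suf := by
  induction pre with
  | nil => simp
  | cons a t ih => simpa using ih

-- erase at a known first index
theorem pvErase_of_index? {α : Type} [BEq α] [LawfulBEq α] (xs : List α) (v : α) (i : Nat)
    (h : PySem.List.index? xs v = some i) : xs.erase v = xs.eraseIdx i := by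
  obtain ⟨pre, suf, hxs, hlen, hnot⟩ := (PySem.List.index?_eq_some_iff xs v i).mp h
  subst hxs; subst hlen
  rw [List.erase_append_right _ hnot, List.erase_cons_head, pvEraseIdx_append]

theorem pvIndex?_of_getElem {α : Type} [BEq α] [LawfulBEq α] (xs : List α) (v : α) (i : Nat)
    (hi : i < xs.length) (h1 : xs[i] = v) (h2 : ∀ j (hj : j < i), xs[j]'(by omega) ≠ v) :
    PySem.List.index? xs v = some i := by
  apply (PySem.List.index?_eq_some_iff xs v i).mpr
  refine ⟨xs.take i, xs.drop (i+1), ?_, by simp [List.length_take]; omega, ?_⟩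
  · conv_lhs => rw [← List.take_append_drop i xs]
    rw [List.drop_eq_getElem_cons hi, h1]
  · intro hmem
    obtain ⟨j, hj, hje⟩ := List.mem_iff_getElem.mp hmem
    have hj2 : j < i ∧ j < xs.length := by simpa [List.length_take] using hj
    have hj' : j < i := hj2.1
    rw [List.getElem_take] at hje
    exact h2 j hj' hje

theorem pvSelLoop_spec (cnt : Char → Int) :
    ∀ (P L res : List Char), P.Perm L → L.Pairwise (· < ·) → P.Pairwise (pvR cnt) →
    res.length < 5 →
    pvSelLoop L.length L (L.map cnt) res = res ++ P.take (5 - res.length) := by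
  intro P
  induction P with
  | nil =>
    intro L res hperm _ _ _
    have hL : L = [] := (List.Perm.nil_eq hperm).symm
    subst hL
    simp [pvSelLoop]
  | cons m P' ih =>
    intro L res hperm hLpw hPpw hres
    have hmL : m ∈ L := hperm.subset (by simp)
    have hLne : L ≠ [] := by rintro rfl; exact absurd hperm.eq_nil (by simp)
    -- every count is ≤ cnt m
    have hmax_le : ∀ y ∈ L, cnt y ≤ cnt m := by
      intro y hy
      have hyP : y ∈ m :: P' := hperm.mem_iff.mpr hy
      rcases List.mem_cons.mp hyP with rfl | hyP'
      · exact le_refl _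
      · rcases (List.pairwise_cons.mp hPpw).1 y hyP' with h | h
        · omega
        · omega
    -- max? computes cnt m
    have hmax : PySem.List.max? (L.map cnt) (fun v => v) = some (cnt m) := by
      cases hmx : PySem.List.max? (L.map cnt) (fun v => v) with
      | none =>
        exfalso
        have := (PySem.List.max?_eq_none_iff (xs := L.map cnt) (key := fun v => v)).mp hmx
        exact hLne (List.map_eq_nil_iff.mp this)
      | some mx =>
        have hmem := PySem.List.max?_mem hmx
        have hismax := PySem.List.max?_isMax hmx
        obtain ⟨z, hz, hzmx⟩ := List.mem_map.mp hmem
        have h1 : mx ≤ cnt m := hzmx ▸ hmax_le z hz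
        have h2 : cnt m ≤ mx := hismax (cnt m) (List.mem_map_of_mem hmL)
        congr 1; omega
    -- index of the max
    cases hidx : PySem.List.index? (L.map cnt) (cnt m) with
    | none =>
      exact absurd (List.mem_map_of_mem hmL) ((PySem.List.index?_eq_none_iff _ _).mp hidx)
    | some i =>
      obtain ⟨hi, hgi, hbefore⟩ := PySem.List.getElem_of_index?_eq_some hidx
      have hiL : i < L.length := by simpa using hi
      rw [List.getElem_map] at hgi
      -- the letter at index i is m
      have hnodup : L.Nodup := hLpw.imp (fun {a b} h => ne_of_lt h)
      have hLi : L[i] = m := by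
        by_contra hne
        have hmem : L[i] ∈ m :: P' := hperm.mem_iff.mpr (List.getElem_mem hiL)
        rcases List.mem_cons.mp hmem with he | hmem'
        · exact hne he
        · have hR := (List.pairwise_cons.mp hPpw).1 _ hmem'
          obtain ⟨p, hp, hpm⟩ := List.mem_iff_getElem.mp hmL
          have hrepp : (L.map cnt)[p]'(by simpa using hp) = cnt m := by
            rw [List.getElem_map, hpm]
          have hip : i ≤ p := by
            by_contra hgt
            exact hbefore p (by omega) hrepp
          have hlt : i < p := by
            rcases lt_or_eq_of_le hip with h | h
            · exact h
            · exact absurd (h ▸ hpm) hne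
          have : L[i] < L[p] := List.pairwise_iff_getElem.mp hLpw i p hiL hp hlt
          rw [hpm] at this
          rcases hR with h | h
          · omega
          · exact absurd h.2 (not_lt.mpr (le_of_lt this))
      -- resolve the removals
      have hidxL : PySem.List.index? L m = some i := by
        apply pvIndex?_of_getElem L m i hiL hLi
        intro j hj hje
        exact hbefore j hj (by rw [List.getElem_map, hje])
      have hremL : PySem.List.remove? L m = some (L.eraseIdx i) := by
        rw [PySem.List.remove?_eq_some_erase L m hmL, pvErase_of_index? L m i hidxL]
      have hremR : PySem.List.remove? (L.map cnt) (cnt m) = some ((L.eraseIdx i).map cnt) := by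
        rw [PySem.List.remove?_eq_some_erase (L.map cnt) (cnt m) (List.mem_map_of_mem hmL),
            pvErase_of_index? (L.map cnt) (cnt m) i hidx, List.eraseIdx_map]
      -- facts for the recursive call
      have hperm' : P'.Perm (L.eraseIdx i) := by
        have h1 : L.Perm (m :: L.erase m) := List.perm_cons_erase hmL
        have h2 := (pvErase_of_index? L m i hidxL) ▸ h1
        exact (List.perm_cons m).mp (hperm.trans h2)
      have hpw' : (L.eraseIdx i).Pairwise (· < ·) := hLpw.sublist (List.eraseIdx_sublist L i)
      have hlen' : (L.eraseIdx i).length = L.length - 1 := by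
        rw [List.length_eraseIdx_of_lt hiL]
      -- unfold one step of the loop
      obtain ⟨n, hn⟩ : ∃ n, L.length = n + 1 := ⟨L.length - 1, by cases L <;> simp_all⟩
      rw [hn, pvSelLoop]
      simp only [hmax, hidx, List.getElem?_eq_getElem hiL, hLi, hremL, hremR]
      by_cases hb : (res ++ [m]).length = 5
      · have h4 : res.length = 4 := by simpa using hb
        simp only [hb, if_true]
        have : 5 - res.length = 1 := by omega
        rw [this, List.take_succ_cons, List.take_zero]
      · simp only [hb, if_false]
        have hlt5 : (res ++ [m]).length < 5 := by simp at hb ⊢; omega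
        have hn' : n = (L.eraseIdx i).length := by omega
        rw [hn', ih (L.eraseIdx i) (res ++ [m]) hperm' hpw' (List.pairwise_cons.mp hPpw).2 hlt5]
        have h5 : 5 - res.length = (5 - (res ++ [m]).length) + 1 := by simp; omega
        rw [h5, List.take_succ_cons]
        simp

theorem pvFoldlAppend (parts : List (List Char)) (acc : List Char) :
    parts.foldl (fun a w => a ++ w) acc = acc ++ parts.flatten := by
  induction parts generalizing acc <;> simp_all

theorem pvJoinNil (parts : List (List Char)) : PySem.Chars.join [] parts = parts.flatten := by
  induction parts with
  | nil => rfl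
  | cons a t ih => cases t <;> simp_all [PySem.Chars.join, List.intercalate, List.intersperse]

theorem pvOfList_sublist (xs : List Char) : List.Sublist (PySem.Set.ofList xs) xs := by
  induction xs with
  | nil => simp [PySem.Set.ofList, PySem.Set.empty]
  | cons x t ih =>
    rw [PySem.Set.ofList_cons]
    have hd : List.Sublist (PySem.Set.discard (PySem.Set.ofList t) x) (PySem.Set.ofList t) := by
      unfold PySem.Set.discard; exact List.filter_sublist
    exact List.Sublist.cons₂ x (hd.trans ih)

theorem pvPairwise_lt_ofList (xs : List Char) (h : xs.Pairwise (· ≤ ·)) :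
    (PySem.Set.ofList xs : List Char).Pairwise (· < ·) := by
  have h1 : (PySem.Set.ofList xs : List Char).Pairwise (· ≤ ·) := h.sublist (pvOfList_sublist xs)
  have h2 := PySem.Set.nodup_ofList xs
  exact (h1.and h2).imp (fun {a b} hh => lt_of_le_of_ne hh.1 hh.2)

theorem pvSorted_R (cnt : Char → Int) (L : List Char) (h : L.Pairwise (· < ·)) :
    (PySem.List.sorted L (fun c => -cnt c)).Pairwise (pvR cnt) := by
  rw [PySem.List.sorted_eq_foldl_insertBy]
  exact pvFoldl_R cnt L [] h (by simp) (by simp)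

-- ===== VERDICT (by name: the statement is the Claim_ definition above) =====
theorem validar_cifra_spec : Claim_equal_validar_cifra := by
  intro cifra seq_controlo _
  unfold Spec_validar_cifra validar_cifra validar_cifra_alt
  cases hsp : PySem.Chars.split? cifra.toList ['-'] with
  | none => rfl
  | some parts =>
    have hstr1 : parts.foldl (fun acc w => acc ++ w) [] = parts.flatten := by
      simpa using pvFoldlAppend parts []
    simp only [hstr1, pvJoinNil, pvCountA, PySem.Dict.foldl_insert_getD_add_one_eq_counter]
    set fl := parts.flatten with hfl
    set cnt : Char → Int := fun c => (fl.count c : Int) with hcnt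
    set xsA := PySem.List.sorted fl (fun c => c) with hxsA
    set LA : List Char := PySem.Set.ofList xsA with hLA
    set LB := PySem.List.sorted (PySem.Set.ofList fl) (fun c => c) with hLB
    set M := PySem.List.sorted LB (fun c => -cnt c) with hM
    have hkeysA : (PySem.Dict.counter xsA).keys = LA := PySem.Dict.keys_counter xsA
    have hvalsA : (PySem.Dict.counter xsA).values = LA.map cnt := by
      show ((PySem.Dict.counter xsA).items.map (fun p => p.2)) = _
      rw [PySem.Dict.items_counter, List.map_map]
      refine List.map_congr_left (fun k hk => ?_)
      simp only [Function.comp]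
      rw [hcnt]
      congr 1
      exact (PySem.List.sorted_perm fl (fun c => c) false).count_eq k
    have hLApw : LA.Pairwise (· < ·) :=
      pvPairwise_lt_ofList xsA (PySem.List.sorted_pairwise fl (fun c => c))
    have hMR : M.Pairwise (pvR cnt) :=
      pvSorted_R cnt LB (PySem.List.sorted_ofList_pairwise_lt fl)
    have hMperm : M.Perm LA := by
      refine (PySem.List.sorted_perm LB (fun c => -cnt c) false).trans
        ((PySem.List.sorted_perm (PySem.Set.ofList fl) (fun c => c) false).trans ?_)
      refine (List.perm_ext_iff_of_nodup (PySem.Set.nodup_ofList fl) (PySem.Set.nodup_ofList xsA)).mpr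
        (fun a => ?_)
      rw [PySem.Set.mem_ofList, PySem.Set.mem_ofList, hxsA, PySem.List.mem_sorted]
    have hsel : pvSelLoop LA.length LA (LA.map cnt) [] = M.take 5 := by
      simpa using pvSelLoop_spec cnt M LA [] hMperm hLApw hMR (by simp)
    have hkeyfun : (fun c => -((PySem.Dict.counter fl).getD c 0)) = fun c => -cnt c :=
      funext fun c => by rw [PySem.Dict.getD_counter]
    rw [hkeysA, hvalsA, hsel, PySem.Dict.keys_counter, hkeyfun, ← hLB, ← hM]
    by_cases h : M.take 5 = PySem.List.slice seq_controlo.toList (some 1) (some 6) <;>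
      simp [PySem.Chars.slice, h]
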